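-- pv_equiv track=rewrite | github.com/ChanHongMing/basis_quantum-_group | E14_E22.py | genstr2
-- ===== SOURCE A (Python) =====
-- import itertools
--
-- def genstr2(n,r):
--     listt=[]
--     a="E"*n
--     for i in itertools.combinations(range(n), r):
--         p=list(a)
--         for j in i:
--             p[j]='e'
--         listt.append(''.join(p))
--     return listt
--
-- p=[]
-- ===== SOURCE B (Python) =====
-- def genstr2(n, r):
--     out = []
--     buf = []
--     stack = [(0, r, None)]          # (position, 'e's still to place, char to write at position-1)
--     while stack:
--         pos, rem, c = stack.pop()
--         if c is not None:
--             buf[pos - 1:] = [c]     # backtrack the buffer and write this branch's char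
--         if rem == 0:
--             out.append(''.join(buf) + 'E' * (n - pos))      # rest is forced: all 'E'
--         elif rem == n - pos:
--             out.append(''.join(buf) + 'e' * rem)            # rest is forced: all 'e'
--         elif 0 < rem < n - pos:
--             # push 'E' first, 'e' second, so 'e' is explored first (itertools' order)
--             stack.append((pos + 1, rem, 'E'))
--             stack.append((pos + 1, rem - 1, 'e'))
--     return out
-- ===== Notes on version B (the rewrite author's own statement) =====
-- stated objective: alternative
-- what changed: Replaces itertools.combinations plus per-combination index-patching of an 'E'*n template by a direct recursion that builds each string position by position ('e' branch before 'E' branch, pruning when too few positions remain), producing the same lexicographic order with no index arithmetic.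
import Mathlib
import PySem

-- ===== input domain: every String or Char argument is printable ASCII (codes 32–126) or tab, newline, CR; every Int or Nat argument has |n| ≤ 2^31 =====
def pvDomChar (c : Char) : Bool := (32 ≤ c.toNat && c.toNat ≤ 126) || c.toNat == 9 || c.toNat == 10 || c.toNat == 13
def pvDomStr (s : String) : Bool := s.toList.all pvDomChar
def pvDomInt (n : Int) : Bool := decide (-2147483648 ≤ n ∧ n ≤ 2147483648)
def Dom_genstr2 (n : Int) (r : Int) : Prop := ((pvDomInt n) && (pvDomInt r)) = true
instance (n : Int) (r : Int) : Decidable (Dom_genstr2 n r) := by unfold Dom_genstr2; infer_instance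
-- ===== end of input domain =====

-- B builds the strings position by position by recursion instead of patching an "E"*n template
-- at itertools.combinations' index tuples; same output and order, alternative decomposition.


-- ===== PORT A =====
-- Hand port of itertools.combinations(range(lo+k), r) restricted to indices ≥ lo:
-- lexicographic order, exactly itertools' order. k = number of indices still available.
def pvCombs (k : Nat) (lo : Nat) (r : Nat) : List (List Nat) :=
  match r, k with
  | 0, _ => [[]]
  | _ + 1, 0 => []
  | s + 1, k + 1 => (pvCombs k (lo + 1) s).map (fun c => lo :: c) ++ pvCombs k (lo + 1) (s + 1)

-- p[j]='e' is List.set: j comes from combinations(range(n)), hence always in range (no IndexError).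
def genstr2 (n : Int) (r : Int) : List String :=
  let a := List.replicate n.toNat 'E'        -- a = "E"*n  (empty for n ≤ 0)
  (pvCombs n.toNat 0 r.toNat).map (fun i =>
    String.ofList (i.foldl (fun p j => p.set j 'e') a))

-- ===== PORT B =====
-- buf[pos-1:] = [c] from Source B (backtrack the shared buffer and write this branch's char)
def pvApply (buf : List Char) (pos : Nat) (c : Option Char) : List Char :=
  match c with
  | none => buf
  | some ch => buf.take (pos - 1) ++ [ch]

-- termination lemmas for pvLoop (cited by its decreasing_by)
theorem pv_dec_pop (a S : Nat) : S < 3 ^ a + S :=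
  Nat.lt_add_of_pos_left (Nat.pow_pos (by norm_num))

theorem pv_dec_push (n : Int) (pos : Nat) (S : Nat) (h : 1 < n - (pos : Int)) :
    3 ^ ((n + 1 - ((pos + 1 : Nat) : Int)).toNat) +
      (3 ^ ((n + 1 - ((pos + 1 : Nat) : Int)).toNat) + S) <
    3 ^ ((n + 1 - (pos : Int)).toNat) + S := by
  have ha : (n + 1 - ((pos + 1 : Nat) : Int)).toNat = (n - (pos : Int)).toNat := by push_cast; omega
  have hb : (n + 1 - (pos : Int)).toNat = (n - (pos : Int)).toNat + 1 := by omega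
  have hp : 0 < 3 ^ ((n - (pos : Int)).toNat) := Nat.pow_pos (by norm_num)
  have hs : 3 ^ ((n - (pos : Int)).toNat + 1) = 3 ^ ((n - (pos : Int)).toNat) * 3 := Nat.pow_succ ..
  rw [ha, hb, hs]
  omega

-- the while-loop of Source B: explicit DFS stack of (pos, rem, char-to-write); 'e' entry on top
def pvLoop (n : Int) (stack : List (Nat × Int × Option Char)) (buf : List Char) (out : List String) : List String :=
  match stack with
  | [] => out
  | (pos, rem, c) :: rest =>
    let buf' := pvApply buf pos c
    if rem = 0 then
      pvLoop n rest buf' (out ++ [String.ofList (buf' ++ List.replicate (n - (pos : Int)).toNat 'E')])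
    else if rem = n - (pos : Int) then
      pvLoop n rest buf' (out ++ [String.ofList (buf' ++ List.replicate rem.toNat 'e')])
    else if 0 < rem ∧ rem < n - (pos : Int) then
      pvLoop n ((pos + 1, rem - 1, some 'e') :: (pos + 1, rem, some 'E') :: rest) buf' out
    else
      pvLoop n rest buf' out
termination_by (stack.map (fun e => 3 ^ ((n + 1 - (e.1 : Int)).toNat))).sum
decreasing_by
  · simp only [List.map_cons, List.sum_cons]
    exact pv_dec_pop ..
  · simp only [List.map_cons, List.sum_cons]
    exact pv_dec_pop ..
  · simp only [List.map_cons, List.sum_cons]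
    exact pv_dec_push n pos _ (by omega)
  · simp only [List.map_cons, List.sum_cons]
    exact pv_dec_pop ..

def genstr2_alt (n : Int) (r : Int) : List String :=
  pvLoop n [(0, r, none)] [] []

-- ===== PRECONDITION & SPEC =====
-- Pre_ excludes exactly r < 0, where Python A raises ValueError (itertools.combinations).
def Pre_genstr2 (n : Int) (r : Int) : Prop := 0 ≤ r
instance (n : Int) (r : Int) : Decidable (Pre_genstr2 n r) := by unfold Pre_genstr2; infer_instance
def pvWitness_genstr2 : Int × Int := (3, 2)

def Spec_genstr2 (n : Int) (r : Int) (out : List String) : Prop := out = genstr2_alt n r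
instance (n : Int) (r : Int) (out : List String) : Decidable (Spec_genstr2 n r out) := by unfold Spec_genstr2; infer_instance

-- ===== CLAIM (what is proved, stated in full; the proofs are below) =====
def Claim_equal_genstr2 : Prop := ∀ (n : Int) (r : Int), Dom_genstr2 n r → Pre_genstr2 n r → Spec_genstr2 n r (genstr2 n r)

-- ===== LEMMAS AND PROOFS =====

-- setting index j to 'e' in a range-map is updating the mapped function
theorem pv_set_range_map (N : Nat) (f : Nat → Char) (j : Nat) :
    ((List.range N).map f).set j 'e' = (List.range N).map (fun i => if i = j then 'e' else f i) := by
  apply List.ext_getElem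
  · simp
  · intro i h1 h2
    simp only [List.getElem_set, List.getElem_map, List.getElem_range]
    by_cases hij : i = j
    · subst hij; simp
    · simp [hij, Ne.symm hij]

-- A's inner loop: patching 'e' at the indices of c into (range N).map f
theorem pv_foldl_set (c : List Nat) (N : Nat) (f : Nat → Char) :
    c.foldl (fun p j => p.set j 'e') ((List.range N).map f)
      = (List.range N).map (fun i => if i ∈ c then 'e' else f i) := by
  induction c generalizing f with
  | nil => simp
  | cons j c ih =>
      simp only [List.foldl_cons]
      rw [pv_set_range_map, ih]
      apply List.map_congr_left
      intro i _
      by_cases h1 : i ∈ c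
      · simp [h1]
      · by_cases h2 : i = j <;> simp [h1, h2]

-- every index in a combination of pvCombs k lo r is ≥ lo
theorem pv_combs_lb (k : Nat) (lo : Nat) (r : Nat) (c : List Nat) (hc : c ∈ pvCombs k lo r)
    (j : Nat) (hj : j ∈ c) : lo ≤ j := by
  induction k generalizing lo r c with
  | zero =>
      match r, hc with
      | 0, hc => simp [pvCombs] at hc; subst hc; simp at hj
  | succ k ih =>
      match r with
      | 0 => simp [pvCombs] at hc; subst hc; simp at hj
      | s + 1 =>
          simp only [pvCombs, List.mem_append, List.mem_map] at hc
          rcases hc with ⟨c', hc', rfl⟩ | hc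
          · rcases List.mem_cons.mp hj with rfl | hj
            · exact le_refl j
            · exact Nat.le_of_succ_le (ih (lo + 1) s c' hc' hj)
          · exact Nat.le_of_succ_le (ih (lo + 1) (s + 1) c hc hj)

-- not enough indices left: no combinations
theorem pv_combs_nil (k : Nat) (lo : Nat) (r : Nat) (h : k < r) : pvCombs k lo r = [] := by
  induction k generalizing lo r with
  | zero =>
      match r, h with
      | s + 1, _ => rfl
  | succ k ih =>
      match r, h with
      | s + 1, h =>
          have h' : k < s := Nat.lt_of_succ_lt_succ h
          simp [pvCombs, ih (lo + 1) s h', ih (lo + 1) (s + 1) (Nat.lt_succ_of_lt h')]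

-- rendering a combination as a char: 'e' at its indices, 'E' elsewhere
def pvChi (cm : List Nat) (i : Nat) : Char := if i ∈ cm then 'e' else 'E'

-- the empty combination renders as all 'E'
theorem pv_render_nil (pos k : Nat) :
    (List.range' pos k).map (pvChi []) = List.replicate k 'E' := by
  have : ∀ i ∈ List.range' pos k, pvChi [] i = 'E' := by intro i _; simp [pvChi]
  rw [List.map_congr_left this]
  simp

-- the full combination: pvCombs k lo k = [range' lo k], rendering as all 'e'
theorem pv_combs_full (k : Nat) (lo : Nat) : pvCombs k lo k = [List.range' lo k] := by
  induction k generalizing lo with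
  | zero => rfl
  | succ k ih =>
      simp [pvCombs, ih (lo + 1), pv_combs_nil k (lo + 1) (k + 1) (Nat.lt_succ_self k),
        List.range'_succ]

theorem pv_render_full (pos k : Nat) :
    (List.range' pos k).map (pvChi (List.range' pos k)) = List.replicate k 'e' := by
  have : ∀ i ∈ List.range' pos k, pvChi (List.range' pos k) i = 'e' := by
    intro i hi; simp [pvChi, hi]
  rw [List.map_congr_left this]
  simp

-- main invariant: popping one entry runs its whole DFS subtree, emitting exactly the
-- rendered combinations of the remaining positions, and only touches buf beyond pos
theorem pv_machine (n : Int) (k : Nat) :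
    ∀ (pos : Nat) (rem : Nat) (c : Option Char)
      (stack : List (Nat × Int × Option Char)) (buf : List Char) (out : List String),
      n - (pos : Int) = (k : Int) →
      (pvApply buf pos c).length = pos →
      ∃ buf', buf'.take pos = pvApply buf pos c ∧
        pvLoop n ((pos, (rem : Int), c) :: stack) buf out
          = pvLoop n stack buf'
              (out ++ (pvCombs k pos rem).map (fun cm =>
                String.ofList ((pvApply buf pos c) ++ (List.range' pos k).map (pvChi cm)))) := by
  induction k with
  | zero =>
      intro pos rem c stack buf out hk hlen
      refine ⟨pvApply buf pos c, List.take_of_length_le (le_of_eq hlen), ?_⟩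
      rw [pvLoop]
      match rem with
      | 0 =>
          have h0 : (n - (pos : Int)).toNat = 0 := by omega
          simp [pvCombs, h0]
      | s + 1 =>
          have h1 : ¬ ((s : Int) + 1 = 0) := by omega
          have h2 : ¬ ((s : Int) + 1 = n - (pos : Int)) := by omega
          have h3 : ¬ ((s : Int) + 1 < n - (pos : Int)) := by omega
          simp [pvCombs, h1, h2, h3]
  | succ k ih =>
      intro pos rem c stack buf out hk hlen
      have hplen : (pvApply buf pos c).length = pos := hlen
      match rem with
      | 0 =>
          refine ⟨pvApply buf pos c, List.take_of_length_le (le_of_eq hlen), ?_⟩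
          rw [pvLoop]
          have h0 : (n - (pos : Int)).toNat = k + 1 := by omega
          simp [pvCombs, h0, pv_render_nil]
      | s + 1 =>
          by_cases hfull : s + 1 = k + 1
          · -- all remaining positions forced to 'e'
            have hs' : s = k := by omega
            subst hs'
            refine ⟨pvApply buf pos c, List.take_of_length_le (le_of_eq hlen), ?_⟩
            rw [pvLoop]
            rw [if_neg (show ¬ (((s + 1 : Nat) : Int) = 0) by omega),
              if_pos (show ((s + 1 : Nat) : Int) = n - (pos : Int) by omega)]
            have h3 : ((s + 1 : Nat) : Int).toNat = s + 1 := by omega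
            simp [pv_combs_full, pv_render_full]
          · by_cases hlt : s + 1 < k + 1
            · -- both branches: 'e' subtree first, then 'E' subtree
              have h1 : ¬ ((s : Int) + 1 = 0) := by omega
              have h2 : ¬ ((s : Int) + 1 = n - (pos : Int)) := by omega
              have h3 : (s : Int) + 1 < n - (pos : Int) := by omega
              have h0 : (0 : Int) < (s : Int) + 1 := by omega
              have hsub : (s : Int) + 1 - 1 = (s : Int) := by omega
              rw [pvLoop]
              simp only [Nat.cast_add, Nat.cast_one, h1, if_false, h2, h3, and_true]
              rw [if_pos h0, hsub]
              set p := pvApply buf pos c with hp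
              have htp : p.take pos = p := List.take_of_length_le (le_of_eq hplen)
              -- 'e' subtree
              have hke : n - ((pos + 1 : Nat) : Int) = (k : Int) := by push_cast; push_cast at hk; omega
              have hlen_e : (pvApply p (pos + 1) (some 'e')).length = pos + 1 := by
                simp [pvApply, htp, hplen]
              obtain ⟨buf₁, hb₁, he⟩ := ih (pos + 1) s (some 'e')
                ((pos + 1, ((s + 1 : Nat) : Int), some 'E') :: stack) p out hke hlen_e
              have happ_e : pvApply p (pos + 1) (some 'e') = p ++ ['e'] := by
                simp [pvApply, htp]
              -- 'E' subtree, running on buf₁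
              have hb₁p : buf₁.take pos = p := by
                have : (buf₁.take (pos + 1)).take pos = buf₁.take pos := by
                  rw [List.take_take]; congr 1; omega
                rw [← this, hb₁, happ_e, List.take_left' hplen]
              have hlen_E : (pvApply buf₁ (pos + 1) (some 'E')).length = pos + 1 := by
                simp [pvApply, hb₁p, hplen]
              obtain ⟨buf₂, hb₂, hE⟩ := ih (pos + 1) (s + 1) (some 'E') stack buf₁
                (out ++ (pvCombs k (pos + 1) s).map (fun cm =>
                  String.ofList ((pvApply p (pos + 1) (some 'e')) ++ (List.range' (pos + 1) k).map (pvChi cm)))) hke hlen_E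
              have happ_E : pvApply buf₁ (pos + 1) (some 'E') = p ++ ['E'] := by
                simp [pvApply, hb₁p]
              have hb₂p : buf₂.take pos = p := by
                have : (buf₂.take (pos + 1)).take pos = buf₂.take pos := by
                  rw [List.take_take]; congr 1; omega
                rw [← this, hb₂, happ_E, List.take_left' hplen]
              refine ⟨buf₂, hb₂p, ?_⟩
              push_cast at he hE
              rw [he, hE]
              congr 1
              rw [List.append_assoc]
              congr 1
              -- combinatorial step: pvCombs (k+1) pos (s+1) splits into the two subtrees
              simp only [pvCombs, List.map_append, List.map_map, List.range'_succ, happ_e, happ_E]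
              congr 1
              · apply List.map_congr_left
                intro cm _
                have hmap : (List.range' (pos + 1) k).map (pvChi (pos :: cm))
                          = (List.range' (pos + 1) k).map (pvChi cm) := by
                  apply List.map_congr_left
                  intro i hi
                  have : pos + 1 ≤ i := (List.mem_range'_1.mp hi).1
                  have hne : ¬ i = pos := by omega
                  simp [pvChi, hne]
                simp [pvChi, hmap]
              · apply List.map_congr_left
                intro cm hcm
                have hnot : pos ∉ cm := by
                  intro hmem
                  have := pv_combs_lb k (pos + 1) (s + 1) cm hcm pos hmem
                  omega
                simp [pvChi, hnot]
            · -- too many 'e's left: dead end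
              refine ⟨pvApply buf pos c, List.take_of_length_le (le_of_eq hlen), ?_⟩
              rw [pvLoop]
              have h1 : ¬ ((s : Int) + 1 = 0) := by omega
              have h2 : ¬ ((s : Int) + 1 = n - (pos : Int)) := by omega
              have h3 : ¬ ((s : Int) + 1 < n - (pos : Int)) := by omega
              have hnil : pvCombs (k + 1) pos (s + 1) = [] :=
                pv_combs_nil (k + 1) pos (s + 1) (by omega)
              simp [h1, h2, h3, hnil]

-- ===== VERDICT (by name: the statement is the Claim_ definition above) =====
theorem genstr2_spec : Claim_equal_genstr2 := by
  intro n r _ hpre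
  have hr0 : 0 ≤ r := hpre
  unfold Spec_genstr2 genstr2 genstr2_alt
  have hrep : List.replicate n.toNat 'E' = (List.range n.toNat).map (fun _ => 'E') := by
    simp [List.map_const']
  by_cases hn : 0 ≤ n
  · obtain ⟨buf', -, heq⟩ := pv_machine n n.toNat 0 r.toNat none [] [] []
      (by omega) (by simp [pvApply])
    rw [show r = ((r.toNat : Nat) : Int) by omega, heq]
    rw [pvLoop]
    simp only [List.nil_append, Int.toNat_natCast]
    apply List.map_congr_left
    intro cm _
    rw [hrep, pv_foldl_set]
    simp [pvApply, List.range_eq_range']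
    rfl
  · -- n < 0: "E"*n is empty; [''] for r = 0, [] otherwise
    have hn0 : n.toNat = 0 := by omega
    rw [pvLoop]
    by_cases hr : r = 0
    · subst hr
      rw [if_pos rfl, pvLoop]
      simp [pvApply, pvCombs, hn0]
    · obtain ⟨s, hs⟩ : ∃ s, r.toNat = s + 1 := ⟨r.toNat - 1, by omega⟩
      have h2 : ¬ (r = n - ((0 : Nat) : Int)) := by omega
      have h3 : ¬ (0 < r ∧ r < n - ((0 : Nat) : Int)) := by omega
      rw [if_neg hr, if_neg h2, if_neg h3, pvLoop]
      simp [hn0, hs, pvCombs]
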